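-- pv_equiv track=rewrite | github.com/daniel-reich/turbo-robot | vfuZia9ufckGzhGZh_22.py | seq_level
-- ===== SOURCE A (Python) =====
-- def seq_level(lst):
--   difference = lambda x: [x[foo + 1] - x[foo] for foo in range(len(x) - 1)]
--   return_lst = ["Linear", "Quadratic", "Cubic"]
--
--   for bar in range(3):
--     lst = difference(lst)
--     if len(set(lst)) == 1:
--       return return_lst[bar]
--   return None
-- ===== SOURCE B (Python) =====
-- def seq_level(lst):
--     # k-th finite difference computed directly from the original list via
--     # binomial coefficients, instead of chaining difference() on its own output.
--     names = ["Linear", "Quadratic", "Cubic"]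
--     for k, coeffs in enumerate(([-1, 1], [1, -2, 1], [-1, 3, -3, 1])):
--         d = [sum(c * lst[j + i] for i, c in enumerate(coeffs))
--              for j in range(len(lst) - k - 1)]
--         if len(set(d)) == 1:
--             return names[k]
--     return None
-- ===== Notes on version B (the rewrite author's own statement) =====
-- stated objective: alternative
-- what changed: Each order's difference list is computed directly from the original list with fixed binomial coefficients (closed-form k-th finite difference) instead of repeatedly re-differencing the previous difference list.
import Mathlib
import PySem

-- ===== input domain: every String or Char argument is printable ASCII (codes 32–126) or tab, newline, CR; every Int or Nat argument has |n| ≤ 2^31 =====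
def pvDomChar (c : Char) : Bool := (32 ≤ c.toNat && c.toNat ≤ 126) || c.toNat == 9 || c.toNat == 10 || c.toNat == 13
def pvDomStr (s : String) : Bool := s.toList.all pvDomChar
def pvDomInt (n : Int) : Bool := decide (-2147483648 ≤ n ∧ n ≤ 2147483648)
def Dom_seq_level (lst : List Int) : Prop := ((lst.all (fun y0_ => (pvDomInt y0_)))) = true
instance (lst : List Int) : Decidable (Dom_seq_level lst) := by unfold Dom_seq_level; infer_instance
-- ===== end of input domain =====

-- B computes each order's difference list straight from the original list with fixed
-- binomial coefficients instead of chaining difference() on its own output (alternative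
-- decomposition, same cost); return values are proved identical on all inputs.

-- ===== PORT A =====
-- difference = lambda x: [x[foo + 1] - x[foo] for foo in range(len(x) - 1)]
def pyDifference (x : List Int) : List Int :=
  (PySem.List.pyRange 0 ((x.length : Int) - 1) 1).map
    (fun foo => PySem.List.pyGetD x (foo + 1) 0 - PySem.List.pyGetD x foo 0)
    -- indices foo, foo+1 are always in range here, so total pyGetD is exact

-- for bar in range(3): lst = difference(lst); if len(set(lst)) == 1: return return_lst[bar]
def seqA_loop : List Int → List Nat → Option String
  | _, [] => none
  | l, bar :: rest =>
      let l' := pyDifference l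
      if PySem.Set.len (PySem.Set.ofList l') = 1 then
        PySem.List.pyGet? ["Linear", "Quadratic", "Cubic"] (bar : Int)
      else seqA_loop l' rest

def seq_level (lst : List Int) : Option String :=
  seqA_loop lst [0, 1, 2]

-- ===== PORT B =====
-- sum(c * lst[j + i] for i, c in enumerate(coeffs))
def binomTerm (lst : List Int) (coeffs : List Int) (j : Int) : Int :=
  (PySem.List.enumerate coeffs).foldl
    (fun acc ic => acc + ic.2 * PySem.List.pyGetD lst (j + ic.1) 0) 0

-- for k, coeffs in enumerate(...): d = [...]; if len(set(d)) == 1: return names[k]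
def seqB_loop : List Int → List (Nat × List Int) → Option String
  | _, [] => none
  | lst, (k, cs) :: rest =>
      let d := (PySem.List.pyRange 0 ((lst.length : Int) - (k : Int) - 1) 1).map
        (fun j => binomTerm lst cs j)
      if PySem.Set.len (PySem.Set.ofList d) = 1 then
        PySem.List.pyGet? ["Linear", "Quadratic", "Cubic"] (k : Int)
      else seqB_loop lst rest

def seq_level_alt (lst : List Int) : Option String :=
  seqB_loop lst [(0, [-1, 1]), (1, [1, -2, 1]), (2, [-1, 3, -3, 1])]

-- ===== PRECONDITION & SPEC =====
def Spec_seq_level (lst : List Int) (out : Option String) : Prop := out = seq_level_alt lst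
instance (lst : List Int) (out : Option String) : Decidable (Spec_seq_level lst out) := by unfold Spec_seq_level; infer_instance

-- ===== CLAIM (what is proved, stated in full; the proofs are below) =====
def Claim_equal_seq_level : Prop := ∀ (lst : List Int), Dom_seq_level lst → Spec_seq_level lst (seq_level lst)

-- ===== LEMMAS AND PROOFS =====
lemma length_pyDifference (x : List Int) : (pyDifference x).length = x.length - 1 := by
  simp [pyDifference, PySem.List.length_pyRange_one]
lemma getElem_pyDifference (x : List Int) (k : Nat) (h : k < (pyDifference x).length) :
    (pyDifference x)[k] = x.getD (k + 1) 0 - x.getD k 0 := by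
  simp only [pyDifference, List.getElem_map, PySem.List.getElem_pyRange_one]
  have h1 : (0:Int) + (k:Int) + 1 = ((k+1:Nat):Int) := by push_cast; ring
  have h2 : (0:Int) + (k:Int) = ((k:Nat):Int) := by ring_nf
  rw [h1, h2, PySem.List.pyGetD_natCast, PySem.List.pyGetD_natCast]
lemma getD_pyDifference (x : List Int) (k : Nat) (hk : k < x.length - 1) :
    (pyDifference x).getD k 0 = x.getD (k + 1) 0 - x.getD k 0 := by
  have hl : k < (pyDifference x).length := by rw [length_pyDifference]; omega
  rw [List.getD_eq_getElem _ _ hl, getElem_pyDifference x k hl]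


lemma binomTerm1 (lst : List Int) (j : Nat) :
    binomTerm lst [-1, 1] (j : Int) = -lst.getD j 0 + lst.getD (j+1) 0 := by
  simp only [binomTerm, PySem.List.enumerate_cons, PySem.List.enumerate_nil, List.foldl]
  norm_num
  rw [show (j:Int)+1 = ((j+1:Nat):Int) by push_cast; ring]
  simp only [PySem.List.pyGetD_natCast, List.getD_eq_getElem?_getD]
lemma binomTerm2 (lst : List Int) (j : Nat) :
    binomTerm lst [1, -2, 1] (j : Int) =
      lst.getD j 0 - 2 * lst.getD (j+1) 0 + lst.getD (j+2) 0 := by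
  simp only [binomTerm, PySem.List.enumerate_cons, PySem.List.enumerate_nil, List.foldl]
  norm_num
  rw [show (j:Int)+1 = ((j+1:Nat):Int) by push_cast; ring,
      show (j:Int)+2 = ((j+2:Nat):Int) by push_cast; ring]
  simp only [PySem.List.pyGetD_natCast, List.getD_eq_getElem?_getD]
  ring
lemma binomTerm3 (lst : List Int) (j : Nat) :
    binomTerm lst [-1, 3, -3, 1] (j : Int) =
      -lst.getD j 0 + 3 * lst.getD (j+1) 0 - 3 * lst.getD (j+2) 0 + lst.getD (j+3) 0 := by
  simp only [binomTerm, PySem.List.enumerate_cons, PySem.List.enumerate_nil, List.foldl]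
  norm_num
  rw [show (j:Int)+1 = ((j+1:Nat):Int) by push_cast; ring,
      show (j:Int)+2 = ((j+2:Nat):Int) by push_cast; ring,
      show (j:Int)+3 = ((j+3:Nat):Int) by push_cast; ring]
  simp only [PySem.List.pyGetD_natCast, List.getD_eq_getElem?_getD]
  ring

lemma E0 (lst : List Int) :
    pyDifference lst =
      (PySem.List.pyRange 0 ((lst.length : Int) - 1) 1).map (fun j => binomTerm lst [-1, 1] j) := by
  apply List.ext_getElem
  · simp [length_pyDifference, PySem.List.length_pyRange_one]
  · intro i h1 h2
    rw [getElem_pyDifference lst i h1]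
    simp only [List.getElem_map, PySem.List.getElem_pyRange_one, zero_add, binomTerm1]
    ring
lemma E1 (lst : List Int) :
    pyDifference (pyDifference lst) =
      (PySem.List.pyRange 0 ((lst.length : Int) - 1 - 1) 1).map (fun j => binomTerm lst [1, -2, 1] j) := by
  apply List.ext_getElem
  · simp [length_pyDifference, PySem.List.length_pyRange_one]
  · intro i h1 h2
    have hi : i < lst.length - 1 - 1 := by
      simp [length_pyDifference] at h1; omega
    rw [getElem_pyDifference _ i h1,
        getD_pyDifference lst (i+1) (by omega), getD_pyDifference lst i (by omega)]
    simp only [List.getElem_map, PySem.List.getElem_pyRange_one, zero_add, binomTerm2]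
    ring
lemma E2 (lst : List Int) :
    pyDifference (pyDifference (pyDifference lst)) =
      (PySem.List.pyRange 0 ((lst.length : Int) - 2 - 1) 1).map (fun j => binomTerm lst [-1, 3, -3, 1] j) := by
  apply List.ext_getElem
  · simp [length_pyDifference, PySem.List.length_pyRange_one]; omega
  · intro i h1 h2
    have hi : i < lst.length - 1 - 1 - 1 := by
      simp [length_pyDifference] at h1; omega
    have hgd : ∀ k : Nat, k < lst.length - 1 - 1 →
        (pyDifference (pyDifference lst)).getD k 0 =
          lst.getD (k+2) 0 - 2 * lst.getD (k+1) 0 + lst.getD k 0 := by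
      intro k hk
      rw [getD_pyDifference _ k (by simp [length_pyDifference]; omega),
          getD_pyDifference lst (k+1) (by omega), getD_pyDifference lst k (by omega)]
      ring
    rw [getElem_pyDifference _ i h1, hgd (i+1) (by omega), hgd i (by omega)]
    simp only [List.getElem_map, PySem.List.getElem_pyRange_one, zero_add, binomTerm3]
    ring


-- ===== VERDICT (by name: the statement is the Claim_ definition above) =====
theorem seq_level_spec : Claim_equal_seq_level := by
  intro lst _
  unfold Spec_seq_level seq_level seq_level_alt
  simp only [seqA_loop, seqB_loop, Nat.cast_zero, Nat.cast_one, Nat.cast_ofNat, sub_zero]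
  rw [E2 lst, E1 lst, E0 lst]
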